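-- pv_equiv track=rewrite | github.com/alberto139/Udacity | socialnetwork.py | get_secondary_connections
-- ===== SOURCE A (Python) =====
-- def get_connections(network, user):
--     if user not in network:
--         return None
--     return network[user][0]
--
-- def get_secondary_connections(network, user):
--     secondary_connections = []
--     connection_list = get_connections(network, user)
--     if user not in network:
--         return None
--     elif not network[user][0]:
--         return []
--     # If the user has no connections then and empty list is returned
--
--     else:
--         for connection in connection_list:
--         # Goes trough each connection for the given user
--             for secondary in network[connection][0]:
--             # Goes trough each connection (secondary) for the connection of the given user
--                 if secondary not in secondary_connections:
--                     secondary_connections.append(secondary)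
--
--     return secondary_connections
-- ===== SOURCE B (Python) =====
-- def get_connections(network, user):
--     if user not in network:
--         return None
--     return network[user][0]
--
--
-- def get_secondary_connections(network, user):
--     connections = get_connections(network, user)
--     if connections is None:
--         return None
--     remaining = [s for c in connections for s in network[c][0]]
--     # Repeated-filter dedup: no membership test against anything seen so far;
--     # each round emits the current head and deletes ALL of its copies from the
--     # remaining work list, so every element is inspected only while it is still new.
--     result = []
--     while remaining:
--         head = remaining[0]
--         result.append(head)
--         remaining = [s for s in remaining[1:] if s != head]
--     return result
-- ===== Notes on version B (the rewrite author's own statement) =====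
-- stated objective: alternative
-- what changed: Replaces A's seen-accumulator nested loops (append if not already in the output) by a worklist algorithm: flatten once, then repeatedly emit the head of the work list and filter every remaining copy of it out, so no membership test against the output ever happens.
import Mathlib
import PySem

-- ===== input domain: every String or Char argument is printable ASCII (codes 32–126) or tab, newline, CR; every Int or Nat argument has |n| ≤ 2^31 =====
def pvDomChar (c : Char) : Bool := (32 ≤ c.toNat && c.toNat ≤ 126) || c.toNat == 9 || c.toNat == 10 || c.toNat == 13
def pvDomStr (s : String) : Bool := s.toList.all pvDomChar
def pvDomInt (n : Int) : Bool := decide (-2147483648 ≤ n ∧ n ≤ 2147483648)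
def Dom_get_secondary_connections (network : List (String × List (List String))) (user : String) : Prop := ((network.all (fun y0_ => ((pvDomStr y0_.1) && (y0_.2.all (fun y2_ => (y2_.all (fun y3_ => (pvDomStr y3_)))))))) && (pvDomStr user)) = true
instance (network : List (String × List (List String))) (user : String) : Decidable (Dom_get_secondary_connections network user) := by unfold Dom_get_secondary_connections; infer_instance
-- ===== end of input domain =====

-- B replaces A's seen-accumulator dedup (append if not already in the output) by a
-- worklist algorithm: flatten once, then repeatedly emit the head and filter all its
-- copies out of the remaining work list; alternative decomposition, same return value.


-- ===== PORT A =====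
-- helper `get_connections`: `user not in network` / `network[user]` via first-match
-- lookup on the association list; `[0]` via pyGet? (none = IndexError, excluded by Pre_).
def get_connections (network : List (String × List (List String))) (user : String) :
    Option (List String) :=
  match (PySem.Dict.mk network).get? user with
  | none => none
  | some rows => PySem.List.pyGet? rows 0

-- `network[c][0]` inside the loop, total form: exact under Pre_ (c present, value nonempty).
def pvRow0 (network : List (String × List (List String))) (c : String) : List String :=
  ((PySem.Dict.mk network).getD c []).headD []

def get_secondary_connections (network : List (String × List (List String))) (user : String) :
    Option (List String) :=
  let connection_list := get_connections network user
  match connection_list with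
  | none => none        -- `user not in network` → None (pyGet? none = IndexError, outside Pre_)
  | some row0 =>        -- row0 = network[user][0] = connection_list
    if row0 = [] then some []   -- `elif not network[user][0]: return []`
    else
      some (row0.foldl (fun acc connection =>
        (pvRow0 network connection).foldl
          (fun secs secondary =>
            if secondary ∈ secs then secs else secs ++ [secondary]) acc) [])

-- ===== PORT B =====
-- the `while remaining:` worklist loop of Source B: emit the head, filter its copies out
def pvWorklist (result : List String) : List String → List String
  | [] => result
  | head :: rest => pvWorklist (result ++ [head]) (rest.filter (fun s => s ≠ head))
termination_by remaining => remaining.length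
decreasing_by
  have h1 := List.length_filter_le (fun x : {x // x ∈ rest} => !decide (x.1 = head)) rest.attach
  simp at h1 ⊢
  omega

def get_secondary_connections_alt (network : List (String × List (List String))) (user : String) :
    Option (List String) :=
  match get_connections network user with
  | none => none
  | some connections =>
    let remaining := connections.flatMap (fun c => pvRow0 network c)
    some (pvWorklist [] remaining)

-- ===== PRECONDITION & SPEC =====
-- Pre_ excludes exactly the inputs where Python A raises: user present with an empty
-- row list (IndexError on network[user][0]), or a connection of user absent from the
-- network (KeyError) or present with an empty row list (IndexError on network[c][0]).
def preRowOk (network : List (String × List (List String))) (c : String) : Bool :=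
  match (PySem.Dict.mk network).get? c with
  | none => false
  | some rows => !rows.isEmpty

def Pre_get_secondary_connections (network : List (String × List (List String))) (user : String) : Prop :=
  (match (PySem.Dict.mk network).get? user with
   | none => true
   | some rows => !rows.isEmpty && (rows.headD []).all (preRowOk network)) = true

instance (network : List (String × List (List String))) (user : String) :
    Decidable (Pre_get_secondary_connections network user) := by
  unfold Pre_get_secondary_connections; infer_instance

def pvWitness_get_secondary_connections : (List (String × List (List String))) × String :=
  ([("a", [["b"], []]), ("b", [["c", "a", "c"]]), ("c", [["a"]])], "a")

def Spec_get_secondary_connections (network : List (String × List (List String))) (user : String) (out : Option (List String)) : Prop := out = get_secondary_connections_alt network user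
instance (network : List (String × List (List String))) (user : String) (out : Option (List String)) : Decidable (Spec_get_secondary_connections network user out) := by unfold Spec_get_secondary_connections; infer_instance

-- ===== CLAIM (what is proved, stated in full; the proofs are below) =====
def Claim_equal_get_secondary_connections : Prop := ∀ (network : List (String × List (List String))) (user : String), Dom_get_secondary_connections network user → Pre_get_secondary_connections network user → Spec_get_secondary_connections network user (get_secondary_connections network user)

-- ===== LEMMAS AND PROOFS =====

-- A's membership-append fold with partial output `acc` equals B's worklist run on the
-- elements of `ys` not yet emitted (those outside `acc`).
theorem foldl_mem_append_eq_worklist (ys acc : List String) :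
    ys.foldl (fun a s => if s ∈ a then a else a ++ [s]) acc
      = pvWorklist acc (ys.filter (fun y => decide (y ∉ acc))) := by
  induction ys generalizing acc with
  | nil => simp [pvWorklist]
  | cons s rest ih =>
    by_cases hs : s ∈ acc
    · simpa [List.foldl_cons, hs] using ih acc
    · have hfilt : rest.filter (fun y => decide (y ∉ acc ++ [s]))
          = (rest.filter (fun y => decide (y ∉ acc))).filter (fun y => decide (y ≠ s)) := by
        rw [List.filter_filter]
        apply List.filter_congr
        intro y _
        simp [List.mem_append, Bool.and_comm]
      rw [List.foldl_cons, if_neg hs, ih, hfilt,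
        List.filter_cons_of_pos (by simpa using hs), pvWorklist]

-- ===== VERDICT (by name: the statement is the Claim_ definition above) =====
theorem get_secondary_connections_spec : Claim_equal_get_secondary_connections := by
  intro network user _ _
  unfold Spec_get_secondary_connections
  unfold get_secondary_connections get_secondary_connections_alt
  cases h : get_connections network user with
  | none => simp
  | some row0 =>
    simp only []
    by_cases hz : row0 = []
    · subst hz; simp; rw [pvWorklist]
    · simp only [if_neg hz]
      rw [← List.foldl_flatMap, foldl_mem_append_eq_worklist]
      simp
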